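-- pv_equiv track=rewrite | github.com/omontes/pura-vida-sloth | src/parsers/sec/section_extractors.py | derive_fiscal_period
-- ===== SOURCE A (Python) =====
-- from typing import Dict, List, Tuple, Optional
--
-- def derive_fiscal_period(report_period: str, fiscal_year_end: str, filing_type: str) -> Tuple[Optional[int], Optional[str]]:
--     """
--     Derive fiscal_year and fiscal_quarter from report_period.
--
--     Args:
--         report_period: Date in YYYY-MM-DD format
--         fiscal_year_end: MMDD format (e.g., "1231" for Dec 31)
--         filing_type: SEC form type (10-K, 10-Q, etc.)
--
--     Returns:
--         (fiscal_year, fiscal_quarter) tuple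
--     """
--     if not report_period:
--         return None, None
--
--     # Extract year and month from report_period
--     try:
--         year, month, day = report_period.split('-')
--         year = int(year)
--         month = int(month)
--     except (ValueError, AttributeError):
--         return None, None
--
--     fiscal_year = year
--     fiscal_quarter = None
--
--     # For 10-K/10-Q, derive quarter
--     if filing_type in ['10-Q', '10-K']:
--         # Determine quarter based on month
--         quarter_map = {
--             (1, 2, 3): 'Q1',
--             (4, 5, 6): 'Q2',
--             (7, 8, 9): 'Q3',
--             (10, 11, 12): 'Q4'
--         }
--
--         for months, quarter in quarter_map.items():
--             if month in months:
--                 fiscal_quarter = quarter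
--                 break
--
--         # For 10-K, it's always Q4 (full year)
--         if filing_type == '10-K':
--             fiscal_quarter = 'Q4'
--
--     return fiscal_year, fiscal_quarter
-- ===== SOURCE B (Python) =====
-- def derive_fiscal_period(report_period: str, fiscal_year_end: str, filing_type: str):
--     if not report_period:
--         return None, None
--     parts = report_period.split('-')
--     if len(parts) != 3:
--         return None, None
--     try:
--         year = int(parts[0])
--         month = int(parts[1])
--     except ValueError:
--         return None, None
--     if filing_type == '10-K':
--         quarter = 'Q4'
--     elif filing_type == '10-Q' and 1 <= month <= 12:
--         quarter = f'Q{(month - 1) // 3 + 1}'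
--     else:
--         quarter = None
--     return year, quarter
-- ===== Notes on version B (the rewrite author's own statement) =====
-- stated objective: idiomatic
-- what changed: Replaced the quarter_map dict and its membership-scanning loop with closed-form arithmetic Q{(month-1)//3+1} guarded by 1<=month<=12, and '10-K' short-circuits to 'Q4' directly.
import Mathlib
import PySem

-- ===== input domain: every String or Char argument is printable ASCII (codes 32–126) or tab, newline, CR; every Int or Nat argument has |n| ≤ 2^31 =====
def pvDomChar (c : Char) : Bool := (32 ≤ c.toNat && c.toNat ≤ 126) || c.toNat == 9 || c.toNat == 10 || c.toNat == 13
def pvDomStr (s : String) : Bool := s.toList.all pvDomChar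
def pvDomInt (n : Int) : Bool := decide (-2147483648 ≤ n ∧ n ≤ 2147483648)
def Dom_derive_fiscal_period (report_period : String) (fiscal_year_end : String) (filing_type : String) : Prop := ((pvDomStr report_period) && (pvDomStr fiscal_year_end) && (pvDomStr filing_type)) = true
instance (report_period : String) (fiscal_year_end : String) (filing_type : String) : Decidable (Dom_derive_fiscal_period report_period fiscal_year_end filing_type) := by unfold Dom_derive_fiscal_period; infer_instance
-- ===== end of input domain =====

-- B replaces A's quarter_map dict + membership-scanning loop by closed-form quarter arithmetic (idiomatic; same cost).

-- ===== PORT A =====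
-- the 'for months, quarter in quarter_map.items(): if month in months: … break' loop
def pvQuarterLoop (month : Int) : List (List Int × String) → Option String
  | [] => none
  | (ms, q) :: rest => if month ∈ ms then some q else pvQuarterLoop month rest

def derive_fiscal_period (report_period : String) (fiscal_year_end : String) (filing_type : String) : Option Int × Option String :=
  if report_period = "" then (none, none)
  else
    match PySem.Chars.splitOn report_period.toList ['-'] with   -- 'year, month, day = report_period.split("-")': any other arity raises ValueError (caught)
    | [ys, ms, _ds] =>
      match PySem.Int.ofChars? ys, PySem.Int.ofChars? ms with
      | some year, some month =>
        let fiscal_quarter : Option String :=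
          if filing_type = "10-Q" ∨ filing_type = "10-K" then
            let q := pvQuarterLoop month [([1,2,3],"Q1"),([4,5,6],"Q2"),([7,8,9],"Q3"),([10,11,12],"Q4")]
            if filing_type = "10-K" then some "Q4" else q
          else none
        (some year, fiscal_quarter)
      | _, _ => (none, none)   -- int() raised ValueError (caught)
    | _ => (none, none)

-- ===== PORT B =====
def derive_fiscal_period_alt (report_period : String) (fiscal_year_end : String) (filing_type : String) : Option Int × Option String :=
  if report_period = "" then (none, none)
  else
    let parts := PySem.Chars.splitOn report_period.toList ['-']
    if parts.length ≠ 3 then (none, none)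
    else
      match PySem.Int.ofChars? (parts.getD 0 []) with
      | none => (none, none)
      | some year =>
        match PySem.Int.ofChars? (parts.getD 1 []) with
        | none => (none, none)
        | some month =>
          let quarter : Option String :=
            if filing_type = "10-K" then some "Q4"
            else if filing_type = "10-Q" ∧ 1 ≤ month ∧ month ≤ 12 then
              some ("Q" ++ PySem.Int.toStr (PySem.Int.floordiv (month - 1) 3 + 1))
            else none
          (some year, quarter)

-- ===== PRECONDITION & SPEC =====
def Spec_derive_fiscal_period (report_period : String) (fiscal_year_end : String) (filing_type : String) (out : Option Int × Option String) : Prop := out = derive_fiscal_period_alt report_period fiscal_year_end filing_type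
instance (report_period : String) (fiscal_year_end : String) (filing_type : String) (out : Option Int × Option String) : Decidable (Spec_derive_fiscal_period report_period fiscal_year_end filing_type out) := by unfold Spec_derive_fiscal_period; infer_instance

-- ===== CLAIM (what is proved, stated in full; the proofs are below) =====
def Claim_equal_derive_fiscal_period : Prop := ∀ (report_period : String) (fiscal_year_end : String) (filing_type : String), Dom_derive_fiscal_period report_period fiscal_year_end filing_type → Spec_derive_fiscal_period report_period fiscal_year_end filing_type (derive_fiscal_period report_period fiscal_year_end filing_type)

-- ===== LEMMAS AND PROOFS =====

-- A's linear scan of quarter_map equals B's closed-form quarter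
theorem pvQuarterLoop_eq (month : Int) :
    pvQuarterLoop month [([1,2,3],"Q1"),([4,5,6],"Q2"),([7,8,9],"Q3"),([10,11,12],"Q4")]
      = if 1 ≤ month ∧ month ≤ 12 then
          some ("Q" ++ PySem.Int.toStr (PySem.Int.floordiv (month - 1) 3 + 1))
        else none := by
  by_cases h : 1 ≤ month ∧ month ≤ 12
  · obtain ⟨h1, h2⟩ := h
    interval_cases month <;> decide
  · have h1 : month ∉ ([1,2,3] : List Int) := by simp; omega
    have h2 : month ∉ ([4,5,6] : List Int) := by simp; omega
    have h3 : month ∉ ([7,8,9] : List Int) := by simp; omega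
    have h4 : month ∉ ([10,11,12] : List Int) := by simp; omega
    simp [pvQuarterLoop, h, h1, h2, h3, h4]

-- ===== VERDICT (by name: the statement is the Claim_ definition above) =====
theorem derive_fiscal_period_spec : Claim_equal_derive_fiscal_period := by
  intro rp fye ft _
  unfold Spec_derive_fiscal_period derive_fiscal_period derive_fiscal_period_alt
  by_cases hrp : rp = ""
  · simp [hrp]
  · simp only [hrp, if_false]
    rcases hl : PySem.Chars.splitOn rp.toList ['-'] with _ | ⟨a, _ | ⟨b, _ | ⟨c, _ | ⟨d, l⟩⟩⟩⟩ <;>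
      simp only [List.length, List.getD] <;> try simp
    · -- the [a, b, c] case
      rcases hy : PySem.Int.ofChars? a with _ | year <;>
        rcases hm : PySem.Int.ofChars? b with _ | month <;> simp
      rw [pvQuarterLoop_eq]
      by_cases hk : ft = "10-K"
      · simp [hk]
      · by_cases hq : ft = "10-Q" <;> simp [hk, hq]
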